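-- pv_equiv track=rewrite | github.com/arpbhusa8/python_simple | hierarchy_paths.py | find_main_spine
-- ===== SOURCE A (Python) =====
-- from typing import Dict, List, Any, Tuple
--
-- def ordered_alignment_table(ga_list: List[str], customer_path: List[str]) -> Tuple[List[Tuple[str, str, str]], List[str], List[str]]:
--     """
--     Aligns GA and customer path in order, matching each GA dimension to the next available customer dimension.
--     Returns:
--         - List of (GA, Customer, Match) tuples for the table
--         - List of unmatched GA dimensions
--         - List of unmatched customer dimensions
--     """
--     table = []
--     ga_idx = 0
--     cust_idx = 0
--     matched_cust_indices = set()
--     unmatched_ga = []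
--     unmatched_cust = []
--     # For each GA dimension, find the next matching customer dimension
--     while ga_idx < len(ga_list):
--         ga_dim = ga_list[ga_idx]
--         found = False
--         for i in range(cust_idx, len(customer_path)):
--             if customer_path[i].lower() == ga_dim.lower():
--                 table.append((ga_dim, customer_path[i], '✓'))
--                 matched_cust_indices.add(i)
--                 cust_idx = i + 1
--                 found = True
--                 break
--         if not found:
--             table.append((ga_dim, '', '✗'))
--             unmatched_ga.append(ga_dim)
--         ga_idx += 1
--     # Any customer dimensions not matched are extra
--     for i, dim in enumerate(customer_path):
--         if i not in matched_cust_indices: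
--             unmatched_cust.append(dim)
--     return table, unmatched_ga, unmatched_cust
--
-- def find_main_spine(paths: List[List[str]], ga_list: List[str]) -> Tuple[List[str], int]:
--     """
--     Find the path with the most matches to the GA list (main spine), using ordered matching.
--     Returns (main_spine, match_count)
--     If no matches, returns the first path as the main spine (if any).
--     """
--     best_path = []
--     best_score = 0
--     for path in paths:
--         table, _, _ = ordered_alignment_table(ga_list, path)
--         score = sum(1 for _, _, match in table if match == '✓')
--         if score > best_score:
--             best_score = score
--             best_path = path
--     # If no matches, return the first path if available
--     if not best_path and paths:
--         best_path = paths[0]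
--         best_score = 0
--     return best_path, best_score
-- ===== SOURCE B (Python) =====
-- def find_main_spine(paths, ga_list):
--     """Same result as A, but per path we index occurrences once (value -> ascending
--     index list) and replay the greedy matching with per-value pointers: O(P*(G+L))
--     instead of A's O(P*G*L) rescan."""
--     ga_low = [g.lower() for g in ga_list]
--     best_path = []
--     best_score = 0
--     for path in paths:
--         pairs = [(dim.lower(), i) for i, dim in enumerate(path)]
--         occ = {}
--         for key, i in pairs:
--             occ.setdefault(key, []).append(i)
--         pos = {}
--         c = 0
--         score = 0
--         for g in ga_low:
--             lst = occ.get(g)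
--             if lst is None:
--                 continue
--             p = pos.get(g, 0)
--             while p < len(lst) and lst[p] < c:
--                 p += 1
--             if p < len(lst):
--                 score += 1
--                 c = lst[p] + 1
--                 pos[g] = p + 1
--             else:
--                 pos[g] = p
--
--         if score > best_score:
--             best_score = score
--             best_path = path
--     if not best_path and paths:
--         best_path = paths[0]
--         best_score = 0
--     return best_path, best_score
-- ===== Notes on version B (the rewrite author's own statement) =====
-- stated objective: faster
-- what changed: Instead of rescanning the customer path from the cursor for every GA dimension, B builds one lowercased value-to-ascending-index map per path and replays the greedy matching with monotone per-value pointers, so each path is traversed O(G+L) amortized instead of O(G*L).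
import Mathlib
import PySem

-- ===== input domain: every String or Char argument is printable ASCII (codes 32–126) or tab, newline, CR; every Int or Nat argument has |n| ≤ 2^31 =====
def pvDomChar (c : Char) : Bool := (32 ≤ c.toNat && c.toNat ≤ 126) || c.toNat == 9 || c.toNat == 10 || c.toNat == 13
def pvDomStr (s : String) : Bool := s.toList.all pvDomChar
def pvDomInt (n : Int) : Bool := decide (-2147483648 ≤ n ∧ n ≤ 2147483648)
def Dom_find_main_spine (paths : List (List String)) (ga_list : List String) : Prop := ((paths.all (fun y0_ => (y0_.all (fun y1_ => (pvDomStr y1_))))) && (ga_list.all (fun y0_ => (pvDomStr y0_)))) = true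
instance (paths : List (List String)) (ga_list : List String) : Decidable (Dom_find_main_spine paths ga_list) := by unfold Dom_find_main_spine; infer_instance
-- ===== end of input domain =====

-- B replaces A's per-GA rescan of the customer path by a one-pass occurrence index
-- (lowered value -> ascending index list) replayed with per-value pointers (objective: faster).


-- ===== PORT A =====
-- inner 'for i in range(cust_idx, len(customer_path)): … break' (indices are nonnegative, so Nat range' = range(cust_idx, len))
def pvInnerScan (cp : List String) (ga_dim : String) : List Nat → Option Nat
  | [] => none
  | i :: rest =>
      if PySem.Str.lower (cp.getD i "") == PySem.Str.lower ga_dim then some i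
      else pvInnerScan cp ga_dim rest

-- the 'while ga_idx < len(ga_list)' loop: state (cust_idx, table, matched_cust_indices, unmatched_ga)
def pvOatLoop (cp : List String) : List String → Nat → List (String × String × String) → PySem.Set Nat → List String → (List (String × String × String) × PySem.Set Nat × List String)
  | [], _, table, matched, uga => (table, matched, uga)
  | g :: gs, cust_idx, table, matched, uga =>
      match pvInnerScan cp g (List.range' cust_idx (cp.length - cust_idx)) with
      | some i => pvOatLoop cp gs (i + 1) (table ++ [(g, cp.getD i "", "✓")]) (PySem.Set.add matched i) uga
      | none => pvOatLoop cp gs cust_idx (table ++ [(g, "", "✗")]) matched (uga ++ [g])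

def ordered_alignment_table (ga_list : List String) (customer_path : List String) : List (String × String × String) × List String × List String :=
  let r := pvOatLoop customer_path ga_list 0 [] PySem.Set.empty []
  let unmatched_cust := (customer_path.zipIdx).foldl (fun acc p => if PySem.Set.contains r.2.1 p.2 then acc else acc ++ [p.1]) []
  (r.1, r.2.2, unmatched_cust)

def find_main_spine (paths : List (List String)) (ga_list : List String) : List String × Int :=
  let r := paths.foldl (fun (b : List String × Int) path =>
      let t := ordered_alignment_table ga_list path
      let score : Int := (t.1.map (fun row => if row.2.2 == "✓" then (1 : Int) else 0)).sum
      if score > b.2 then (path, score) else b) ([], 0)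
  if r.1 == ([] : List String) && !(paths == ([] : List (List String))) then (paths.getD 0 [], 0) else r

-- ===== PORT B =====
-- occurrence index: lowered value -> ascending list of indices
def pvBuildOcc (path : List String) : PySem.Dict String (List Nat) :=
  ((path.zipIdx).map (fun q => (PySem.Str.lower q.1, q.2))).foldl
    (fun d p => d.modify p.1 [] (· ++ [p.2])) PySem.Dict.empty

-- 'while p < len(lst) and lst[p] < c: p += 1'
def pvSkip (lst : List Nat) (c : Nat) (p : Nat) : Nat :=
  if h : p < lst.length then
    if lst.getD p 0 < c then pvSkip lst c (p + 1) else p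
  else p
termination_by lst.length - p

-- 'for g in ga_low': state (pos, c, score)
def pvBLoop (occ : PySem.Dict String (List Nat)) : List String → PySem.Dict String Nat → Nat → Int → Int
  | [], _, _, score => score
  | g :: gs, pos, c, score =>
      match occ.get? g with
      | none => pvBLoop occ gs pos c score
      | some lst =>
          let p := pvSkip lst c (pos.getD g 0)
          if p < lst.length then pvBLoop occ gs (pos.insert g (p + 1)) (lst.getD p 0 + 1) (score + 1)
          else pvBLoop occ gs (pos.insert g p) c score

def find_main_spine_alt (paths : List (List String)) (ga_list : List String) : List String × Int :=
  let ga_low := ga_list.map PySem.Str.lower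
  let r := paths.foldl (fun (b : List String × Int) path =>
      let occ := pvBuildOcc path
      let score := pvBLoop occ ga_low PySem.Dict.empty 0 0
      if score > b.2 then (path, score) else b) ([], 0)
  if r.1 == ([] : List String) && !(paths == ([] : List (List String))) then (paths.getD 0 [], 0) else r

-- ===== PRECONDITION & SPEC =====
def Spec_find_main_spine (paths : List (List String)) (ga_list : List String) (out : List String × Int) : Prop := out = find_main_spine_alt paths ga_list
instance (paths : List (List String)) (ga_list : List String) (out : List String × Int) : Decidable (Spec_find_main_spine paths ga_list out) := by unfold Spec_find_main_spine; infer_instance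

-- ===== CLAIM (what is proved, stated in full; the proofs are below) =====
def Claim_equal_find_main_spine : Prop := ∀ (paths : List (List String)) (ga_list : List String), Dom_find_main_spine paths ga_list → Spec_find_main_spine paths ga_list (find_main_spine paths ga_list)

-- ===== LEMMAS AND PROOFS =====

-- reference function: first index ≥ c (k = absolute position of the head) whose lowered entry is v
def pvFFrom (v : String) : List String → Nat → Nat → Option Nat
  | [], _, _ => none
  | s :: rest, k, c =>
      if c ≤ k ∧ PySem.Str.lower s == v then some k else pvFFrom v rest (k + 1) c

-- reference greedy score over the (already lowered) GA list
def pvGreedy (cp : List String) : List String → Nat → Int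
  | [], _ => 0
  | g :: gs, c =>
      match pvFFrom g cp 0 c with
      | some i => 1 + pvGreedy cp gs (i + 1)
      | none => pvGreedy cp gs c

-- ascending list of indices whose lowered entry is v, starting at absolute position k
def pvOccList (v : String) : List String → Nat → List Nat
  | [], _ => []
  | s :: rest, k =>
      if PySem.Str.lower s == v then k :: pvOccList v rest (k + 1) else pvOccList v rest (k + 1)

def pvScoreOf (table : List (String × String × String)) : Int :=
  (table.map (fun row => if row.2.2 == "✓" then (1 : Int) else 0)).sum

-- loop invariant of B's per-path pass: each pointer is in range and everything before it is < c
def pvInv (occ : PySem.Dict String (List Nat)) (pos : PySem.Dict String Nat) (c : Nat) : Prop :=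
  ∀ v, pos.getD v 0 ≤ (occ.getD v []).length ∧ ∀ j < pos.getD v 0, (occ.getD v []).getD j 0 < c

theorem pvFFrom_drop (v : String) : ∀ (cp : List String) (k c : Nat), k ≤ c →
    pvFFrom v cp k c = pvFFrom v (cp.drop (c - k)) c c := by
  intro cp
  induction cp with
  | nil => intro k c h; simp [pvFFrom]
  | cons s rest ih =>
    intro k c h
    rcases Nat.eq_or_lt_of_le h with rfl | hlt
    · simp
    · have h1 : ¬ (c ≤ k ∧ PySem.Str.lower s == v) := by omega
      have h2 : c - k = (c - (k+1)) + 1 := by omega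
      simp only [pvFFrom, if_neg h1, h2, List.drop_succ_cons]
      exact ih (k+1) c hlt

theorem pvFFrom_some (v : String) : ∀ (cp : List String) (k c i : Nat),
    pvFFrom v cp k c = some i → c ≤ i ∧ i < k + cp.length := by
  intro cp
  induction cp with
  | nil => intro k c i h; simp [pvFFrom] at h
  | cons s rest ih =>
    intro k c i h
    simp only [pvFFrom] at h
    split_ifs at h with h1
    · obtain ⟨hck, _⟩ := h1; cases h; simp; omega
    · have := ih (k+1) c i h; simp; omega

theorem pvFind_occList (v : String) : ∀ (cp : List String) (k c : Nat),
    (pvOccList v cp k).find? (fun x => c ≤ x) = pvFFrom v cp k c := by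
  intro cp
  induction cp with
  | nil => intro k c; simp [pvOccList, pvFFrom]
  | cons s rest ih =>
    intro k c
    simp only [pvOccList, pvFFrom]
    by_cases hm : PySem.Str.lower s == v
    · simp only [if_pos hm, List.find?_cons]
      by_cases hc : c ≤ k
      · simp [hc, hm]
      · simp [hc, hm, ih]
    · have : ¬ (c ≤ k ∧ PySem.Str.lower s == v) := by tauto
      simp [hm, ih]

theorem pvInnerScan_eq (g : String) : ∀ (rest pre : List String) (c : Nat), c ≤ pre.length →
    pvInnerScan (pre ++ rest) g (List.range' pre.length rest.length) = pvFFrom (PySem.Str.lower g) rest pre.length c := by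
  intro rest
  induction rest with
  | nil => intro pre c h; simp [pvInnerScan, pvFFrom]
  | cons s rest ih =>
    intro pre c h
    have hget : (pre ++ s :: rest).getD pre.length "" = s := by
      simp [List.getD_eq_getElem?_getD]
    simp only [List.length_cons, List.range'_succ, pvInnerScan, hget, pvFFrom]
    by_cases hm : PySem.Str.lower s == PySem.Str.lower g
    · simp [hm, h]
    · have hc : ¬ (c ≤ pre.length ∧ PySem.Str.lower s == PySem.Str.lower g) := by tauto
      simp only [if_neg hm, if_neg hc]
      have := ih (pre ++ [s]) c (by simp; omega)
      simpa using this

theorem pvPairs_filter (v : String) : ∀ (path : List String) (k : Nat),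
    (((path.zipIdx k).map (fun q => (PySem.Str.lower q.1, q.2))).filter (fun p => p.1 == v)).map (·.2) = pvOccList v path k := by
  intro path
  induction path with
  | nil => intro k; simp [pvOccList]
  | cons s rest ih =>
    intro k
    simp only [List.zipIdx_cons, List.map_cons, List.filter_cons, pvOccList]
    by_cases hm : PySem.Str.lower s == v
    · simp [hm, ih]
    · simp [hm, ih]

theorem pvBuildOcc_getD (path : List String) (v : String) :
    (pvBuildOcc path).getD v [] = pvOccList v path 0 := by
  unfold pvBuildOcc
  rw [PySem.Dict.getD_foldl_modify_append]
  simp [PySem.Dict.getD_empty, pvPairs_filter]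

theorem pvFind_drop (lst : List Nat) (pred : Nat → Bool) : ∀ (p : Nat), p ≤ lst.length →
    (∀ j < p, pred (lst.getD j 0) = false) → lst.find? pred = (lst.drop p).find? pred := by
  intro p
  induction p with
  | zero => intro _ _; simp
  | succ q ih =>
    intro hle hpre
    have hq : q < lst.length := by omega
    rw [ih (by omega) (fun j hj => hpre j (by omega))]
    rw [← List.getElem_cons_drop hq, List.find?_cons_of_neg]
    have := hpre q (by omega)
    rw [List.getD_eq_getElem lst 0 hq] at this
    simp [this]

theorem pvSkip_spec (lst : List Nat) (c : Nat) : ∀ (n p : Nat), lst.length - p ≤ n → p ≤ lst.length →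
    (∀ j < p, lst.getD j 0 < c) →
    pvSkip lst c p ≤ lst.length ∧ (∀ j < pvSkip lst c p, lst.getD j 0 < c) ∧
      ((if pvSkip lst c p < lst.length then some (lst.getD (pvSkip lst c p) 0) else none) = lst.find? (fun x => c ≤ x)) := by
  intro n
  induction n with
  | zero =>
    intro p hn hp hpre
    have hpl : p = lst.length := by omega
    subst hpl
    have hfail : ∀ j < lst.length, (fun x => decide (c ≤ x)) (lst.getD j 0) = false := by
      intro j hj; simp only [decide_eq_false_iff_not, not_le]; exact hpre j hj
    rw [pvSkip, dif_neg (lt_irrefl _)]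
    refine ⟨le_refl _, hpre, ?_⟩
    rw [if_neg (lt_irrefl _), pvFind_drop lst _ lst.length (le_refl _) hfail]
    simp
  | succ m ih =>
    intro p hn hp hpre
    have hfail : ∀ j < p, (fun x => decide (c ≤ x)) (lst.getD j 0) = false := by
      intro j hj; simp only [decide_eq_false_iff_not, not_le]; exact hpre j hj
    rw [pvSkip]
    by_cases h : p < lst.length
    · simp only [dif_pos h]
      by_cases hlt : lst.getD p 0 < c
      · simp only [if_pos hlt]
        exact ih (p+1) (by omega) (by omega)
          (fun j hj => by rcases Nat.lt_succ_iff_lt_or_eq.mp hj with h' | h'; exact hpre j h'; exact h' ▸ hlt)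
      · simp only [if_neg hlt]
        refine ⟨by omega, hpre, ?_⟩
        simp only [if_pos h]
        rw [pvFind_drop lst _ p (by omega) hfail]
        rw [← List.getElem_cons_drop h, List.find?_cons_of_pos]
        · rw [List.getD_eq_getElem lst 0 h]
        · rw [List.getD_eq_getElem lst 0 h] at hlt; simp; omega
    · simp only [dif_neg h]
      have hpl : p = lst.length := by omega
      refine ⟨hp, hpre, ?_⟩
      simp only [if_neg h]
      rw [pvFind_drop lst _ p hp hfail]
      simp [hpl]

theorem pvScoreOf_append (t : List (String × String × String)) (x : String × String × String) :
    pvScoreOf (t ++ [x]) = pvScoreOf t + (if x.2.2 == "✓" then (1 : Int) else 0) := by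
  simp [pvScoreOf]

theorem pvInnerScan_ffrom (cp : List String) (g : String) (c : Nat) (hc : c ≤ cp.length) :
    pvInnerScan cp g (List.range' c (cp.length - c)) = pvFFrom (PySem.Str.lower g) cp 0 c := by
  have h1 := pvInnerScan_eq g (cp.drop c) (cp.take c) c (by simp [hc])
  rw [List.take_append_drop] at h1
  rw [List.length_take, Nat.min_eq_left hc] at h1
  rw [List.length_drop] at h1
  rw [pvFFrom_drop (PySem.Str.lower g) cp 0 c (Nat.zero_le c)]
  simpa using h1

theorem pvOatLoop_score (cp : List String) : ∀ (gs : List String) (c : Nat) (table : List (String × String × String)) (matched : PySem.Set Nat) (uga : List String),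
    c ≤ cp.length →
    pvScoreOf (pvOatLoop cp gs c table matched uga).1 = pvScoreOf table + pvGreedy cp (gs.map PySem.Str.lower) c := by
  intro gs
  induction gs with
  | nil => intro c table matched uga _; simp [pvOatLoop, pvGreedy]
  | cons g gs ih =>
    intro c table matched uga hc
    simp only [pvOatLoop, pvInnerScan_ffrom cp g c hc, List.map_cons, pvGreedy]
    cases hf : pvFFrom (PySem.Str.lower g) cp 0 c with
    | none =>
      rw [ih c _ _ _ hc, pvScoreOf_append]
      have : (("✗" : String) == "✓") = false := by decide
      rw [this]
      norm_num
    | some i =>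
      have hi := pvFFrom_some (PySem.Str.lower g) cp 0 c i hf
      rw [ih (i+1) _ _ _ (by omega), pvScoreOf_append]
      simp only []
      have : (("✓" : String) == "✓") = true := by decide
      rw [this]
      simp only [if_true]
      ring

theorem pvBLoop_eq (path : List String) : ∀ (gs : List String) (pos : PySem.Dict String Nat) (c : Nat) (score : Int),
    pvInv (pvBuildOcc path) pos c →
    pvBLoop (pvBuildOcc path) gs pos c score = score + pvGreedy path gs c := by
  intro gs
  induction gs with
  | nil => intro pos c score _; simp [pvBLoop, pvGreedy]
  | cons g gs ih =>
    intro pos c score hinv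
    have hocc : (pvBuildOcc path).getD g [] = pvOccList g path 0 := pvBuildOcc_getD path g
    simp only [pvBLoop, pvGreedy]
    cases hg : (pvBuildOcc path).get? g with
    | none =>
      have h0 : (pvBuildOcc path).getD g [] = [] := PySem.Dict.getD_of_get?_eq_none _ _ hg
      have hnone : pvFFrom g path 0 c = none := by
        rw [← pvFind_occList, ← hocc, h0]; simp
      rw [hnone]
      exact ih pos c score hinv
    | some lst =>
      have hlst : (pvBuildOcc path).getD g [] = lst := PySem.Dict.getD_of_get?_eq_some _ _ hg
      have hLO : lst = pvOccList g path 0 := hlst.symm.trans hocc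
      obtain ⟨hb, hpre⟩ := hinv g
      rw [hlst] at hb hpre
      obtain ⟨hsk1, hsk2, hsk3⟩ := pvSkip_spec lst c lst.length (pos.getD g 0) (by omega) hb hpre
      rw [hLO] at hsk3
      rw [pvFind_occList] at hsk3
      rw [← hLO] at hsk3
      set p' := pvSkip lst c (pos.getD g 0) with hp'
      by_cases hp : p' < lst.length
      · rw [if_pos hp] at hsk3
        set i := lst.getD p' 0 with hi
        rw [← hsk3]
        simp only []
        obtain ⟨hci, _⟩ := pvFFrom_some g path 0 c i hsk3.symm
        have hinv' : pvInv (pvBuildOcc path) (pos.insert g (p' + 1)) (i + 1) := by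
          intro v
          rw [PySem.Dict.getD_insert]
          by_cases hv : v = g
          · subst hv
            rw [if_pos rfl, hlst]
            refine ⟨by omega, ?_⟩
            intro j hj
            rcases Nat.lt_succ_iff_lt_or_eq.mp hj with hj' | hj'
            · have := hsk2 j hj'; omega
            · subst hj'; omega
          · rw [if_neg hv]
            obtain ⟨h1, h2⟩ := hinv v
            exact ⟨h1, fun j hj => by have := h2 j hj; omega⟩
        rw [if_pos hp, ih _ _ _ hinv']
        omega
      · rw [if_neg hp] at hsk3
        rw [← hsk3]
        simp only []
        have hinv' : pvInv (pvBuildOcc path) (pos.insert g p') c := by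
          intro v
          rw [PySem.Dict.getD_insert]
          by_cases hv : v = g
          · subst hv
            rw [if_pos rfl, hlst]
            exact ⟨hsk1, hsk2⟩
          · rw [if_neg hv]
            exact hinv v
        rw [if_neg hp, ih _ _ _ hinv']

theorem pvScore_eq (ga_list path : List String) :
    pvScoreOf (pvOatLoop path ga_list 0 [] PySem.Set.empty []).1
      = pvBLoop (pvBuildOcc path) (ga_list.map PySem.Str.lower) PySem.Dict.empty 0 0 := by
  rw [pvOatLoop_score path ga_list 0 [] _ [] (Nat.zero_le _)]
  rw [pvBLoop_eq path _ _ _ _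
    (by intro v; rw [PySem.Dict.getD_empty]; exact ⟨Nat.zero_le _, fun j hj => absurd hj (by omega)⟩)]
  simp [pvScoreOf]

-- ===== VERDICT (by name: the statement is the Claim_ definition above) =====
theorem find_main_spine_spec : Claim_equal_find_main_spine := by
  intro paths ga_list _
  unfold Spec_find_main_spine find_main_spine find_main_spine_alt
  have hfold : paths.foldl (fun (b : List String × Int) path =>
      let t := ordered_alignment_table ga_list path
      let score : Int := (t.1.map (fun row => if row.2.2 == "✓" then (1 : Int) else 0)).sum
      if score > b.2 then (path, score) else b) ([], 0)
    = paths.foldl (fun (b : List String × Int) path =>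
      let occ := pvBuildOcc path
      let score := pvBLoop occ (ga_list.map PySem.Str.lower) PySem.Dict.empty 0 0
      if score > b.2 then (path, score) else b) ([], 0) := by
    apply PySem.List.foldl_congr_mem
    intro acc path _
    have hsc : ((ordered_alignment_table ga_list path).1.map (fun row => if row.2.2 == "✓" then (1 : Int) else 0)).sum
        = pvBLoop (pvBuildOcc path) (ga_list.map PySem.Str.lower) PySem.Dict.empty 0 0 := pvScore_eq ga_list path
    simp only [hsc]
  simp only [hfold]
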